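-- pv_equiv track=rewrite | github.com/FeedAFish/Blitz-game | utils/bots.py | find_consecutive_xo
-- ===== SOURCE A (Python) =====
-- def find_consecutive_xo(lst):
--     count = 1
--     prev = None
--     for star in lst:
--         if star == prev:
--             count += 1
--             if count >= 5:
--                 return star
--         else:
--             count = 1
--         prev = star
--     return None
-- ===== SOURCE B (Python) =====
-- from itertools import groupby
--
-- def find_consecutive_xo(lst):
--     for key, grp in groupby(lst):
--         if sum(1 for _ in grp) >= 5:
--             return key
--     return None
-- ===== Notes on version B (the rewrite author's own statement) =====
-- stated objective: idiomatic
-- what changed: Replaces the manual count/prev state machine with itertools.groupby over runs of equal elements, returning the first group key of length >= 5.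
import Mathlib
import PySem

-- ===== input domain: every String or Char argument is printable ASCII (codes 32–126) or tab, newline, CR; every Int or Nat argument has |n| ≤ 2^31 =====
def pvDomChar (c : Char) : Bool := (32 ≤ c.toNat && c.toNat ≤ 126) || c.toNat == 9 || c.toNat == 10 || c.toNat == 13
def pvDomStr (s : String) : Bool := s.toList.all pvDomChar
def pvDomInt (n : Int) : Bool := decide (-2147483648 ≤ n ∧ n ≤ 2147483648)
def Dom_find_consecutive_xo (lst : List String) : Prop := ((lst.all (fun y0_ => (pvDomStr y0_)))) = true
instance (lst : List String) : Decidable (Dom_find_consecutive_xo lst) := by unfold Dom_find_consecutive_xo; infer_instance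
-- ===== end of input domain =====

-- B replaces A's manual count/prev state machine with a groupby over runs of equal
-- elements, returning the first group key whose run length is ≥ 5 (idiomatic).

-- ===== PORT A =====
-- A's loop with state (count, prev); early 'return star' becomes returning 'some star'.
def find_consecutive_xo_go : List String → Int → Option String → Option String
  | [], _, _ => none
  | star :: rest, count, prev =>
    if some star == prev then
      if 5 ≤ count + 1 then some star
      else find_consecutive_xo_go rest (count + 1) (some star)
    else find_consecutive_xo_go rest 1 (some star)

def find_consecutive_xo (lst : List String) : Option String :=
  find_consecutive_xo_go lst 1 none

-- ===== PORT B =====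
-- groupby: each step consumes one maximal run of equal elements; the run containing x
-- has length 1 + (takeWhile (== x)), the remaining groups are over dropWhile (== x).
def find_consecutive_xo_alt : List String → Option String
  | [] => none
  | x :: xs =>
    if 5 ≤ 1 + (xs.takeWhile (fun s => s == x)).length then some x
    else find_consecutive_xo_alt (xs.dropWhile (fun s => s == x))
termination_by lst => lst.length
decreasing_by
  exact Nat.lt_succ_of_le (List.length_dropWhile_le _ _)

-- ===== PRECONDITION & SPEC =====
def Spec_find_consecutive_xo (lst : List String) (out : Option String) : Prop := out = find_consecutive_xo_alt lst
instance (lst : List String) (out : Option String) : Decidable (Spec_find_consecutive_xo lst out) := by unfold Spec_find_consecutive_xo; infer_instance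

-- ===== CLAIM (what is proved, stated in full; the proofs are below) =====
def Claim_equal_find_consecutive_xo : Prop := ∀ (lst : List String), Dom_find_consecutive_xo lst → Spec_find_consecutive_xo lst (find_consecutive_xo lst)

-- ===== LEMMAS AND PROOFS =====

-- Mid-run invariant: scanning lst with current run element x counted c times (1 ≤ c < 5)
-- returns x iff the rest of the run pushes the count to 5, else recurses past the run.
theorem find_consecutive_xo_go_eq (lst : List String) : ∀ (c : Int) (x : String),
    1 ≤ c → c < 5 →
    find_consecutive_xo_go lst c (some x) =
      (if 5 ≤ c + ((lst.takeWhile (fun s => s == x)).length : Int) then some x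
       else find_consecutive_xo_alt (lst.dropWhile (fun s => s == x))) := by
  induction lst with
  | nil =>
    intro c x h1 h5
    simp [find_consecutive_xo_go, find_consecutive_xo_alt]
    omega
  | cons y rest ih =>
    intro c x h1 h5
    by_cases hyx : y = x
    · subst hyx
      simp only [find_consecutive_xo_go, List.takeWhile, List.dropWhile, beq_self_eq_true,
        if_pos]
      by_cases hc : 5 ≤ c + 1
      · have ht : 5 ≤ c + (((rest.takeWhile (fun s => s == y)).length : Int) + 1) := by
          have : (0:Int) ≤ ((rest.takeWhile (fun s => s == y)).length : Int) := by positivity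
          omega
        simp [hc, ht]
      · rw [if_neg hc, ih (c + 1) y (by omega) (by omega)]
        have : c + 1 + ((rest.takeWhile (fun s => s == y)).length : Int)
             = c + (((rest.takeWhile (fun s => s == y)).length : Int) + 1) := by ring
        rw [this]
        simp only [List.length_cons, Nat.cast_add, Nat.cast_one]
    · have hb : (y == x) = false := by simp [hyx]
      simp only [find_consecutive_xo_go, List.takeWhile, List.dropWhile, hb,
        show (some y == some x) = false by simp [hyx], Bool.false_eq_true, if_false,
        List.length_nil, Int.natCast_zero, add_zero, if_neg (by omega : ¬ (5:Int) ≤ c)]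
      rw [ih 1 y (by omega) (by omega)]
      simp only [find_consecutive_xo_alt]
      by_cases h : 5 ≤ 1 + (rest.takeWhile (fun s => s == y)).length
      · rw [if_pos h, if_pos (by omega)]
      · rw [if_neg h, if_neg (by omega)]

-- ===== VERDICT (by name: the statement is the Claim_ definition above) =====
theorem find_consecutive_xo_spec : Claim_equal_find_consecutive_xo := by
  intro lst _
  unfold Spec_find_consecutive_xo find_consecutive_xo
  cases lst with
  | nil => simp [find_consecutive_xo_go, find_consecutive_xo_alt]
  | cons x xs =>
    simp only [find_consecutive_xo_go, show (some x == none) = false by simp,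
      Bool.false_eq_true, if_false]
    rw [find_consecutive_xo_go_eq xs 1 x (by omega) (by omega)]
    simp only [find_consecutive_xo_alt]
    by_cases h : 5 ≤ 1 + (xs.takeWhile (fun s => s == x)).length
    · rw [if_pos h, if_pos (by omega)]
    · rw [if_neg h, if_neg (by omega)]
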